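-- pv_equiv track=rewrite | github.com/yifanwangsh/myleet | reversevowel.py | reverseVowel
-- ===== SOURCE A (Python) =====
-- def reverseVowel(s):
--     # slist=list(s)
--     # vowels=["a","e","i","o","u","A","E","I","O","U"]
--     # if s=="":
--     #     return ""
--     # front=0
--     # end=-1
--     # while front<len(slist) and slist[front] not in vowels:
--     #     front+=1
--     # while -end<len(slist) and slist[end] not in vowels:
--     #     end-=1
--
--     # while front<len(slist)+end:
--     #     tmp=slist[front]
--     #     slist[front]=slist[end]
--     #     slist[end]=tmp
--     #     front+=1
--     #     end-=1
--     #     while front<len(slist) and slist[front] not in vowels: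
--     #         front+=1
--     #     while -end<len(slist) and slist[end] not in vowels:
--     #         end-=1
--
--     # return "".join(slist)
--
--     newstr=s
--     newlist=[]
--     st=""
--     for i in s:
--         if i in ["a","e","i","o","u","A","E","I","O","U"]:
--             newstr=newstr.replace(i,"*")
--             newlist.append(i)
--         p=len(newstr)
--         l=len(newlist)
--         m=l
--     for t in newstr:
--         if t=="*":
--             m-=1
--             if m>=0:
--                 st+=newlist[m]
--         else:
--             st+=t
--     return st
-- ===== SOURCE B (Python) =====
-- def reverseVowel(s):
--     vowels = set("aeiouAEIOU")
--     a = list(s)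
--     i, j = 0, len(a) - 1
--     while i < j:
--         if a[i] not in vowels:
--             i += 1
--         elif a[j] not in vowels:
--             j -= 1
--         else:
--             a[i], a[j] = a[j], a[i]
--             i += 1
--             j -= 1
--     return "".join(a)
-- ===== Notes on version B (the rewrite author's own statement) =====
-- stated objective: faster
-- what changed: B does the classic two-pointer in-place swap on a char array (advance both ends to the next vowel and exchange them), instead of A's gather-all-vowels pass with '*' marking via repeated full-string str.replace followed by a rebuild pass.
-- intended difference: On strings that already contain '*', A's sentinel collides with the data: A fills the original '*' characters with vowels and drops trailing slots (returning a shorter string, e.g. '*a' -> 'a'), while B swaps exactly the vowels and leaves '*' alone ('*a' -> '*a'), which is the intended behaviour. — e.g. on reverseVowel("*a"): A returns "a", B returns "*a"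
import Mathlib
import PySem

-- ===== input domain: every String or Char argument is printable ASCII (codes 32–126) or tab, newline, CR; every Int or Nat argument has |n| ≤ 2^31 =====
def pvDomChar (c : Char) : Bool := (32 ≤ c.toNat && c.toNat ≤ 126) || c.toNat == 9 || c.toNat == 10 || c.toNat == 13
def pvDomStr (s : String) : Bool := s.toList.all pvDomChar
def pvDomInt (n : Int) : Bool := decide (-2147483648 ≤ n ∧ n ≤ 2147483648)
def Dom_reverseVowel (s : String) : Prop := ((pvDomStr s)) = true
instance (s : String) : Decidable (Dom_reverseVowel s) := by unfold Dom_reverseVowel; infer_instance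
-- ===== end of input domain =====

-- B replaces A's gather-all-vowels pass with '*' marking (via repeated full-string
-- str.replace) plus rebuild pass by the classic two-pointer in-place swap of vowels;
-- on strings that already contain '*' A's sentinel collides with the data and B
-- returns the intended value (see D_ below).

-- ===== PORT A =====
def pvVowels : List Char := ['a', 'e', 'i', 'o', 'u', 'A', 'E', 'I', 'O', 'U']

def reverseVowel (s : String) : String :=
  -- first loop: for i in s: if i in vowels: newstr = newstr.replace(i,"*"); newlist.append(i)
  -- p and l are dead locals in the Python (only m = l survives); m is tracked as Int.
  -- Python's m is unassigned when s is empty, but then it is never read; 0 is a dummy start.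
  let st1 := s.toList.foldl
    (fun (st : List Char × List Char × Int) i =>
      if pvVowels.contains i then
        let newstr := PySem.Chars.replace st.1 [i] ['*']
        let newlist := st.2.1 ++ [i]
        (newstr, newlist, (newlist.length : Int))
      else
        (st.1, st.2.1, (st.2.1.length : Int)))
    (s.toList, [], 0)
  -- second loop: for t in newstr: if t=='*': m -= 1; if m>=0: st += newlist[m]  else: st += t
  -- newlist[m] is always in range when 0 ≤ m (m never reaches newlist.length), so pyGetD is exact.
  let st2 := st1.1.foldl
    (fun (st : List Char × Int) t =>
      if t == '*' then
        let m := st.2 - 1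
        (if 0 ≤ m then st.1 ++ [PySem.List.pyGetD st1.2.1 m ' '] else st.1, m)
      else
        (st.1 ++ [t], st.2))
    ([], st1.2.2)
  String.ofList st2.1

-- ===== PORT B =====
def pvIsVowel (c : Char) : Bool := PySem.Set.contains (PySem.Set.ofList "aeiouAEIOU".toList) c

-- the while loop of Source B: i, j are the two pointers; a[i]/a[j] are exact as getD
-- because the loop only reads them with 0 ≤ i < j < len(a); the swap is two List.set.
-- (In Python j starts at -1 for the empty string; the loop body never runs in either
-- formulation there, so Nat subtraction len - 1 = 0 is faithful.)
def twoPtrGo (a : List Char) (i j : Nat) : List Char :=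
  if _h : i < j then
    if pvIsVowel (a.getD i ' ') = false then twoPtrGo a (i + 1) j
    else if pvIsVowel (a.getD j ' ') = false then twoPtrGo a i (j - 1)
    else twoPtrGo ((a.set i (a.getD j ' ')).set j (a.getD i ' ')) (i + 1) (j - 1)
  else a
termination_by j - i

def reverseVowel_alt (s : String) : String :=
  let a := s.toList
  String.ofList (twoPtrGo a 0 (a.length - 1))

-- ===== PRECONDITION & SPEC =====
-- On strings containing '*', A's sentinel '*' collides with the input: A fills original
-- '*' characters with vowels and silently drops trailing vowel slots (it even returns a
-- shorter string), while B swaps exactly the vowels and leaves '*' alone — the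
-- intended behaviour of the reverse-the-vowels task.
def D_reverseVowel (s : String) : Prop := '*' ∈ s.toList
instance (s : String) : Decidable (D_reverseVowel s) := by unfold D_reverseVowel; infer_instance

def Spec_reverseVowel (s : String) (out : String) : Prop := ¬ D_reverseVowel s → out = reverseVowel_alt s
instance (s : String) (out : String) : Decidable (Spec_reverseVowel s out) := by unfold Spec_reverseVowel; infer_instance

def pvDiffWitness_reverseVowel : String := "*a"
def pvDiffWitnessOut_reverseVowel : String × String := ("a", "*a")

-- ===== CLAIM (what is proved, stated in full; the proofs are below) =====
def Claim_unchanged_reverseVowel : Prop := ∀ (s : String), Dom_reverseVowel s → Spec_reverseVowel s (reverseVowel s)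
def Claim_changed_reverseVowel : Prop := Dom_reverseVowel (pvDiffWitness_reverseVowel) ∧ D_reverseVowel (pvDiffWitness_reverseVowel) ∧ reverseVowel (pvDiffWitness_reverseVowel) = pvDiffWitnessOut_reverseVowel.1 ∧ reverseVowel_alt (pvDiffWitness_reverseVowel) = pvDiffWitnessOut_reverseVowel.2 ∧ pvDiffWitnessOut_reverseVowel.1 ≠ pvDiffWitnessOut_reverseVowel.2
def Claim_exact_reverseVowel : Prop := ∀ (s : String), Dom_reverseVowel s → D_reverseVowel s → reverseVowel s ≠ reverseVowel_alt s

-- ===== LEMMAS AND PROOFS =====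

-- the two vowel tests agree
theorem pvIsVowel_eq (c : Char) : pvIsVowel c = pvVowels.contains c := rfl

-- ---- characterisation target: fill the vowel slots with the reversed vowel stream ----
def pvFill : List Char → List Char → List Char
  | [], _ => []
  | c :: cs, vs =>
    if pvIsVowel c then vs.headD c :: pvFill cs vs.tail else c :: pvFill cs vs

-- ---- A-side lemmas (replace is a char map; the two folds compute pvFill) ----
theorem replace_go_single (a b : Char) :
    ∀ (l : List Char) (fuel : Nat) (acc : List Char), l.length ≤ fuel →
      PySem.Chars.replace.go [a] [b] fuel l acc
        = acc.reverse ++ l.map (fun c => if c == a then b else c) := by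
  intro l
  induction l with
  | nil =>
    intro fuel acc _
    cases fuel <;> simp [PySem.Chars.replace.go]
  | cons c t ih =>
    intro fuel acc h
    cases fuel with
    | zero => simp at h
    | succ fuel =>
      rw [PySem.Chars.replace.go]
      simp only [List.length_cons] at h
      have hcb : (c == a) = (decide (a = c)) := by
        by_cases hac : a = c
        · simp [hac]
        · simp [hac]
          simp [Ne.symm hac]
      by_cases hc : a = c
      · subst hc
        rw [if_pos (by simp [List.isPrefixOf])]
        simp only [List.length_singleton, List.drop_succ_cons, List.drop_zero,
          List.reverse_singleton, List.singleton_append]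
        rw [ih fuel (b :: acc) (by omega)]
        simp
      · rw [if_neg (by simp [List.isPrefixOf]; exact hc)]
        rw [ih fuel (c :: acc) (by omega)]
        rw [List.map_cons]
        rw [if_neg (by simp [hcb, hc])]
        simp

theorem replace_single (l : List Char) (a b : Char) :
    PySem.Chars.replace l [a] [b] = l.map (fun c => if c == a then b else c) := by
  rw [PySem.Chars.replace]
  simp only [List.isEmpty_cons]
  rw [replace_go_single a b l l.length [] (le_refl _)]
  simp

def pvMark (seen : List Char) (c : Char) : Char :=
  if pvVowels.contains c && seen.contains c then '*' else c

theorem pvMark_vowel (seen : List Char) (i : Char) (hv : pvVowels.contains i = true) (c : Char) :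
    (if pvMark seen c == i then '*' else pvMark seen c) = pvMark (seen ++ [i]) c := by
  have hstar : i ≠ '*' := by rintro rfl; simp [pvVowels] at hv
  have hm : i ∈ pvVowels := List.contains_iff_mem.mp hv
  by_cases h1 : c ∈ pvVowels
  · by_cases h2 : c ∈ seen
    · simp [pvMark, h1, h2, Ne.symm hstar]
    · by_cases h3 : c = i
      · subst h3; simp [pvMark, h1, h2]
      · simp [pvMark, h1, h2, h3]
  · have h3 : c ≠ i := by rintro rfl; exact h1 hm
    simp [pvMark, h1, h3]

theorem pvMark_nonvowel (seen : List Char) (i : Char) (hv : ¬ pvVowels.contains i = true) (c : Char) :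
    pvMark seen c = pvMark (seen ++ [i]) c := by
  have hm : i ∉ pvVowels := fun h => hv (List.contains_iff_mem.mpr h)
  by_cases h3 : c = i
  · subst h3; simp [pvMark, hm]
  · simp [pvMark, h3]

theorem loop1_inv (full : List Char) :
    ∀ (rest seen : List Char),
      rest.foldl
        (fun (st : List Char × List Char × Int) i =>
          if pvVowels.contains i then
            let newstr := PySem.Chars.replace st.1 [i] ['*']
            let newlist := st.2.1 ++ [i]
            (newstr, newlist, (newlist.length : Int))
          else
            (st.1, st.2.1, (st.2.1.length : Int)))
        (full.map (pvMark seen), seen.filter pvVowels.contains,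
          ((seen.filter pvVowels.contains).length : Int))
      = (full.map (pvMark (seen ++ rest)), (seen ++ rest).filter pvVowels.contains,
          (((seen ++ rest).filter pvVowels.contains).length : Int)) := by
  intro rest
  induction rest with
  | nil => intro seen; simp
  | cons i rest ih =>
    intro seen
    rw [List.foldl_cons]
    by_cases hv : pvVowels.contains i = true
    · rw [if_pos hv]
      have h1 : PySem.Chars.replace (full.map (pvMark seen)) [i] ['*']
          = full.map (pvMark (seen ++ [i])) := by
        rw [replace_single, List.map_map]
        exact List.map_congr_left fun c _ => pvMark_vowel seen i hv c
      have h2 : seen.filter pvVowels.contains ++ [i] = (seen ++ [i]).filter pvVowels.contains := by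
        simp [List.filter_append, List.filter, List.contains_iff_mem.mp hv]
      simp only [h1, h2]
      have := ih (seen ++ [i])
      simpa [List.append_assoc] using this
    · rw [if_neg hv]
      have h1 : full.map (pvMark seen) = full.map (pvMark (seen ++ [i])) := by
        exact List.map_congr_left fun c _ => pvMark_nonvowel seen i hv c
      have h2 : seen.filter pvVowels.contains = (seen ++ [i]).filter pvVowels.contains := by
        have hm : i ∉ pvVowels := fun h => hv (List.contains_iff_mem.mpr h)
        simp [List.filter_append, List.filter, hm]
      simp only [h1, h2]
      have := ih (seen ++ [i])
      simpa [List.append_assoc] using this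

theorem pvMark_nil (l : List Char) : l.map (pvMark []) = l := by
  have h : ∀ c ∈ l, pvMark [] c = id c := fun c _ => by simp [pvMark]
  simpa using List.map_congr_left h

theorem pvMark_self (l : List Char) :
    l.map (pvMark l) = l.map (fun c => if pvVowels.contains c then '*' else c) :=
  List.map_congr_left fun c hc => by simp [pvMark, hc]

theorem loop2_inv (W : List Char) :
    ∀ (cs : List Char) (acc : List Char), '*' ∉ cs →
      cs.countP pvVowels.contains ≤ W.length →
      (cs.map (fun c => if pvVowels.contains c then '*' else c)).foldl
        (fun (st : List Char × Int) t =>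
          if t == '*' then
            let m := st.2 - 1
            (if 0 ≤ m then st.1 ++ [PySem.List.pyGetD W m ' '] else st.1, m)
          else
            (st.1 ++ [t], st.2))
        (acc, (cs.countP pvVowels.contains : Int))
      = (acc ++ pvFill cs ((W.take (cs.countP pvVowels.contains)).reverse), 0) := by
  intro cs
  induction cs with
  | nil => intro acc _ _; simp [pvFill]
  | cons c cs ih =>
    intro acc hstar hle
    have hcs : '*' ∉ cs := fun h => hstar (List.mem_cons_of_mem _ h)
    have hcstar : c ≠ '*' := fun h => hstar (h ▸ List.mem_cons_self)
    rw [List.map_cons, List.foldl_cons]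
    by_cases hv : pvVowels.contains c = true
    · set n := cs.countP pvVowels.contains with hn
      have hcount : (c :: cs).countP pvVowels.contains = n + 1 := by
        simp [List.contains_iff_mem.mp hv, hn]
      have hnW : n < W.length := by rw [hcount] at hle; omega
      rw [if_pos hv, hcount]
      simp only [BEq.rfl, if_pos]
      have hm : ((n + 1 : Nat) : Int) - 1 = (n : Int) := by push_cast; ring
      rw [hm]
      have h0 : (0 : Int) ≤ (n : Int) := Int.natCast_nonneg n
      rw [if_pos h0]
      rw [PySem.List.pyGetD_natCast]
      have hget : W.getD n ' ' = W[n] := List.getD_eq_getElem W ' ' hnW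
      have htake : (W.take (n + 1)).reverse = W[n] :: (W.take n).reverse := by
        rw [List.take_add_one]
        simp [List.getElem?_eq_getElem hnW]
      rw [hget, htake]
      rw [pvFill]
      rw [if_pos (by rw [pvIsVowel_eq]; exact hv)]
      simp only [List.headD_cons, List.tail_cons]
      rw [ih (acc ++ [W[n]]) hcs (by omega)]
      simp
    · have hnm : c ∉ pvVowels := fun h => hv (List.contains_iff_mem.mpr h)
      have hcount : (c :: cs).countP pvVowels.contains = cs.countP pvVowels.contains := by
        simp [hnm]
      rw [if_neg hv, hcount]
      rw [if_neg (by simp [hcstar])]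
      rw [pvFill, if_neg (by rw [pvIsVowel_eq]; simp [hnm])]
      rw [ih (acc ++ [c]) hcs (by rw [hcount] at hle; omega)]
      simp

-- A computes pvFill on '*'-free input
theorem reverseVowel_eq_fill (s : String) (h : '*' ∉ s.toList) :
    reverseVowel s = String.ofList (pvFill s.toList ((s.toList.filter pvIsVowel).reverse)) := by
  simp only [reverseVowel]
  have h1 := loop1_inv s.toList s.toList []
  rw [pvMark_nil] at h1
  simp only [List.filter_nil, List.length_nil, Nat.cast_zero, List.nil_append] at h1
  rw [h1, pvMark_self]
  have hlen : ((s.toList.filter pvVowels.contains).length : Int)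
      = (s.toList.countP pvVowels.contains : Int) := by
    rw [List.countP_eq_length_filter]
  rw [hlen, loop2_inv (s.toList.filter pvVowels.contains) s.toList [] h
    (le_of_eq List.countP_eq_length_filter)]
  rw [List.countP_eq_length_filter, List.take_length]
  have hf : s.toList.filter pvIsVowel = s.toList.filter pvVowels.contains :=
    List.filter_congr fun c _ => pvIsVowel_eq c
  rw [hf]
  simp

-- ---- B-side lemmas (two pointers compute pvFill) ----

-- the pure two-pointer recursion on the untouched middle segment
def pvTp (l : List Char) : List Char :=
  if _h : l.length ≤ 1 then l
  else if pvIsVowel (l.headD ' ') = false then l.headD ' ' :: pvTp l.tail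
  else if pvIsVowel (l.getLastD ' ') = false then pvTp l.dropLast ++ [l.getLastD ' ']
  else l.getLastD ' ' :: pvTp l.tail.dropLast ++ [l.headD ' ']
termination_by l.length
decreasing_by
  · simp_all [List.length_tail]; omega
  · simp_all [List.length_dropLast]; omega
  · simp_all [List.length_tail, List.length_dropLast]; omega

theorem pvFill_append (xs : List Char) :
    ∀ (ys vs : List Char),
      pvFill (xs ++ ys) vs = pvFill xs vs ++ pvFill ys (vs.drop (xs.countP pvIsVowel)) := by
  induction xs with
  | nil => intro ys vs; simp [pvFill]
  | cons c xs ih =>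
    intro ys vs
    by_cases hv : pvIsVowel c = true
    · rw [List.cons_append, pvFill, if_pos hv, pvFill, if_pos hv, ih ys vs.tail]
      have h2 : vs.tail.drop (xs.countP pvIsVowel) = vs.drop ((c :: xs).countP pvIsVowel) := by
        rw [← List.drop_one, List.drop_drop]
        congr 1
        rw [List.countP_cons, if_pos (by simp [hv])]
        omega
      rw [h2, List.cons_append]
    · rw [List.cons_append, pvFill, if_neg hv, pvFill, if_neg hv, ih ys vs]
      have h2 : (c :: xs).countP pvIsVowel = xs.countP pvIsVowel := by
        rw [List.countP_cons, if_neg (by simp [hv])]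
        omega
      rw [h2, List.cons_append]

theorem pvFill_stream_extend :
    ∀ (l vs ws : List Char), l.countP pvIsVowel ≤ vs.length →
      pvFill l (vs ++ ws) = pvFill l vs := by
  intro l
  induction l with
  | nil => intro vs ws _; simp [pvFill]
  | cons c t ih =>
    intro vs ws h
    by_cases hv : pvIsVowel c = true
    · rw [List.countP_cons, if_pos (by simp [hv])] at h
      cases vs with
      | nil => simp at h
      | cons v vrest =>
        simp only [pvFill, if_pos hv, List.cons_append, List.headD_cons, List.tail_cons]
        rw [ih vrest ws (by simp at h ⊢; omega)]
    · rw [List.countP_cons, if_neg (by simp [hv])] at h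
      simp only [pvFill, if_neg hv]
      rw [ih vs ws (by simpa using h)]

theorem pvTp_eq_fill : ∀ (n : Nat) (l : List Char), l.length = n →
    pvTp l = pvFill l ((l.filter pvIsVowel).reverse) := by
  intro n
  induction n using Nat.strong_induction_on with
  | _ n ih =>
    intro l hn
    match l with
    | [] => simp [pvTp, pvFill]
    | [c] =>
      by_cases hv : pvIsVowel c = true <;>
        simp [pvTp, pvFill, hv]
    | c :: d :: t =>
      obtain ⟨m, e, hme⟩ := List.eq_nil_or_concat (d :: t) |>.resolve_left (by simp)
      rw [List.concat_eq_append] at hme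
      rw [hme]
      have hlen2 : ¬ (c :: (m ++ [e])).length ≤ 1 := by simp
      have hlast : (c :: (m ++ [e])).getLastD ' ' = e := by
        rw [List.getLastD_cons]
        simp
      have hdrop : (c :: (m ++ [e])).dropLast = c :: m := by
        rw [show c :: (m ++ [e]) = (c :: m) ++ [e] by simp]
        exact List.dropLast_concat
      have hcount : m.countP pvIsVowel = (m.filter pvIsVowel).length :=
        List.countP_eq_length_filter
      have hlt1 : (m ++ [e]).length < n := by
        rw [hme] at hn; simp at hn ⊢; omega
      have hlt2 : (c :: m).length < n := by
        rw [hme] at hn; simp at hn ⊢; omega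
      have hlt3 : m.length < n := by
        rw [hme] at hn; simp at hn ⊢; omega
      by_cases hc : pvIsVowel c = true
      · by_cases he : pvIsVowel e = true
        · -- both ends vowels: swap
          rw [pvTp, dif_neg hlen2, List.headD_cons, if_neg (by simp [hc]), hlast,
            if_neg (by simp [he]), List.tail_cons, List.dropLast_concat]
          rw [ih m.length hlt3 m rfl]
          have hfl : (c :: (m ++ [e])).filter pvIsVowel = c :: (m.filter pvIsVowel ++ [e]) := by
            simp [List.filter_append, hc, he]
          rw [hfl]
          have hrev : (c :: (m.filter pvIsVowel ++ [e])).reverse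
              = e :: ((m.filter pvIsVowel).reverse ++ [c]) := by simp
          rw [hrev]
          rw [pvFill, if_pos hc, List.headD_cons, List.tail_cons]
          rw [pvFill_append m [e] ((m.filter pvIsVowel).reverse ++ [c])]
          rw [pvFill_stream_extend m _ [c] (by simp [hcount])]
          have hdrop2 : ((m.filter pvIsVowel).reverse ++ [c]).drop (m.countP pvIsVowel) = [c] := by
            rw [List.drop_append_of_le_length (by simp [hcount])]
            simp [hcount]
          rw [hdrop2]
          simp [pvFill, he]
        · -- last not vowel
          rw [pvTp, dif_neg hlen2, List.headD_cons, if_neg (by simp [hc]), hlast,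
            if_pos (by simp [he]), hdrop]
          rw [ih (c :: m).length hlt2 (c :: m) rfl]
          have hfl : (c :: (m ++ [e])).filter pvIsVowel = (c :: m).filter pvIsVowel := by
            simp [List.filter_append, he, List.filter_cons]
          rw [hfl]
          rw [show c :: (m ++ [e]) = (c :: m) ++ [e] by simp]
          rw [pvFill_append (c :: m) [e] _]
          congr 1
          simp [pvFill, he]
      · -- head not vowel
        rw [pvTp, dif_neg hlen2, List.headD_cons, if_pos (by simp [hc]), List.tail_cons]
        rw [ih (m ++ [e]).length hlt1 (m ++ [e]) rfl]
        have hfl : (c :: (m ++ [e])).filter pvIsVowel = (m ++ [e]).filter pvIsVowel := by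
          simp [List.filter_cons, hc]
        rw [hfl, pvFill, if_neg hc]

-- decomposing the untouched middle segment at its two ends
theorem seg_head (a : List Char) (i j : Nat) (hij : i ≤ j) (hj : j < a.length) :
    (a.drop i).take (j + 1 - i)
      = a[i]'(by omega) :: (a.drop (i + 1)).take (j - i) := by
  rw [List.drop_eq_getElem_cons (by omega), show j + 1 - i = (j - i) + 1 by omega,
    List.take_succ_cons]

theorem seg_last (a : List Char) (i j : Nat) (hij : i ≤ j) (hj : j < a.length) :
    (a.drop i).take (j + 1 - i)
      = (a.drop i).take (j - i) ++ [a[j]'hj] := by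
  rw [show j + 1 - i = (j - i) + 1 by omega, List.take_add_one]
  have h : (a.drop i)[j - i]? = some (a[j]'hj) := by
    rw [List.getElem?_drop]
    rw [List.getElem?_eq_getElem (by omega)]
    congr 1
    congr 1
    omega
  rw [h]
  rfl

theorem seg_length (a : List Char) (i j : Nat) (_hi : i ≤ j + 1) (hj : j < a.length) :
    ((a.drop i).take (j + 1 - i)).length = j + 1 - i := by
  simp [List.length_take, List.length_drop]
  omega

theorem twoPtrGo_eq_tp : ∀ (a : List Char) (i j : Nat), i ≤ j + 1 → j < a.length →
    twoPtrGo a i j = a.take i ++ pvTp ((a.drop i).take (j + 1 - i)) ++ a.drop (j + 1) := by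
  intro a i j
  induction a, i, j using twoPtrGo.induct with
  | case1 a i j h hv ih =>
    intro _ hj
    have hi : i < a.length := by omega
    have hgd : a.getD i ' ' = a[i]'hi := List.getD_eq_getElem a ' ' hi
    rw [twoPtrGo, dif_pos h, if_pos hv, ih (by omega) hj]
    rw [seg_head a i j (by omega) hj]
    have htp : pvTp (a[i]'hi :: (a.drop (i + 1)).take (j - i))
        = a[i]'hi :: pvTp ((a.drop (i + 1)).take (j - i)) := by
      rw [pvTp, dif_neg (by
          have := seg_length a (i + 1) j (by omega) hj
          simp only [List.length_cons]
          have h2 : ((a.drop (i + 1)).take (j + 1 - (i + 1))).length = j + 1 - (i + 1) := this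
          rw [show j + 1 - (i + 1) = j - i by omega] at h2
          omega),
        List.headD_cons, if_pos (by rw [← hgd]; simpa using hv), List.tail_cons]
    rw [htp]
    rw [show j + 1 - (i + 1) = j - i by omega]
    rw [List.take_add_one, List.getElem?_eq_getElem hi, Option.toList_some]
    simp only [List.append_assoc, List.singleton_append]
  | case2 a i j h hv1 hv2 ih =>
    intro _ hj
    have hi : i < a.length := by omega
    have hgi : a.getD i ' ' = a[i]'hi := List.getD_eq_getElem a ' ' hi
    have hgj : a.getD j ' ' = a[j]'hj := List.getD_eq_getElem a ' ' hj
    rw [twoPtrGo, dif_pos h, if_neg hv1, if_pos hv2, ih (by omega) (by omega)]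
    rw [seg_last a i j (by omega) hj]
    have htp : pvTp ((a.drop i).take (j - i) ++ [a[j]'hj])
        = pvTp ((a.drop i).take (j - i)) ++ [a[j]'hj] := by
      rw [pvTp, dif_neg (by
          have := seg_length a i j (by omega) hj
          rw [seg_last a i j (by omega) hj] at this
          simp only [List.length_append, List.length_singleton] at this
          simp only [List.length_append, List.length_singleton]
          omega),
        if_neg (by
          have hh : ((a.drop i).take (j - i) ++ [a[j]'hj]).headD ' ' = a[i]'hi := by
            rw [← seg_last a i j (by omega) hj, seg_head a i j (by omega) hj, List.headD_cons]
          rw [hh, ← hgi]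
          simpa using hv1),
        List.getLastD_concat, if_pos (by rw [← hgj]; simpa using hv2),
        List.dropLast_concat]
    rw [htp]
    have hdj : a.drop j = a[j]'hj :: a.drop (j + 1) := List.drop_eq_getElem_cons hj
    rw [show j - 1 + 1 = j by omega, hdj]
    simp
  | case3 a i j h hv1 hv2 ih =>
    intro _ hj
    have hi : i < a.length := by omega
    have hgi : a.getD i ' ' = a[i]'hi := List.getD_eq_getElem a ' ' hi
    have hgj : a.getD j ' ' = a[j]'hj := List.getD_eq_getElem a ' ' hj
    have hlen' : ((a.set i (a.getD j ' ')).set j (a.getD i ' ')).length = a.length := by simp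
    rw [twoPtrGo, dif_pos h, if_neg hv1, if_neg hv2, ih (by omega) (by rw [hlen']; omega)]
    -- the three pieces of the state after the swap
    have c1 : ((a.set i (a.getD j ' ')).set j (a.getD i ' ')).take (i + 1)
        = a.take i ++ [a[j]'hj] := by
      apply List.ext_getElem
      · simp; omega
      · intro k hk1 hk2
        simp only [List.getElem_take, List.getElem_set]
        by_cases hki : k = i
        · subst hki
          rw [if_neg (by omega), if_pos rfl, hgj,
            List.getElem_append_right (by simp)]
          simp
        · have hklt : k < i := by simp at hk1; omega
          rw [if_neg (by omega), if_neg (by omega)]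
          rw [List.getElem_append_left (by simp; omega)]
          simp [List.getElem_take]
    have c2 : ((a.set i (a.getD j ' ')).set j (a.getD i ' ')).drop j
        = a[i]'hi :: a.drop (j + 1) := by
      apply List.ext_getElem
      · simp; omega
      · intro k hk1 hk2
        simp only [List.getElem_drop, List.getElem_set]
        cases k with
        | zero =>
          simp only [List.getElem_cons_zero]
          rw [if_pos (by omega), hgi]
        | succ k =>
          rw [if_neg (by omega), if_neg (by omega)]
          simp only [List.getElem_cons_succ, List.getElem_drop]
          congr 1
          omega
    have c3 : (((a.set i (a.getD j ' ')).set j (a.getD i ' ')).drop (i + 1)).take (j - 1 + 1 - (i + 1))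
        = (a.drop (i + 1)).take (j - i - 1) := by
      apply List.ext_getElem
      · simp; omega
      · intro k hk1 hk2
        simp only [List.getElem_take, List.getElem_drop, List.getElem_set]
        have hk : k < j - i - 1 := by
          simp only [List.length_take, List.length_drop, List.length_set] at hk1
          omega
        rw [if_neg (by omega), if_neg (by omega)]
    rw [show j - 1 + 1 = j by omega] at *
    rw [c1, c2, c3]
    -- the segment before the swap, decomposed at both ends
    rw [seg_head a i j (by omega) hj]
    have hinner : (a.drop (i + 1)).take (j - i)
        = (a.drop (i + 1)).take (j - i - 1) ++ [a[j]'hj] := by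
      have := seg_last a (i + 1) j (by omega) hj
      rw [show j + 1 - (i + 1) = j - i by omega, show j - (i + 1) = j - i - 1 by omega] at this
      exact this
    rw [hinner]
    have htp : pvTp (a[i]'hi :: ((a.drop (i + 1)).take (j - i - 1) ++ [a[j]'hj]))
        = a[j]'hj :: pvTp ((a.drop (i + 1)).take (j - i - 1)) ++ [a[i]'hi] := by
      rw [pvTp, dif_neg (by simp),
        List.headD_cons, if_neg (by rw [← hgi]; simpa using hv1)]
      rw [show (a[i]'hi :: ((a.drop (i + 1)).take (j - i - 1) ++ [a[j]'hj])).getLastD ' '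
            = a[j]'hj by rw [List.getLastD_cons, List.getLastD_concat]]
      rw [if_neg (by rw [← hgj]; simpa using hv2), List.tail_cons, List.dropLast_concat]
    rw [htp]
    simp
  | case4 a i j h =>
    intro hi hj
    rw [twoPtrGo, dif_neg h]
    by_cases hij : i = j
    · subst hij
      have hseg : (a.drop i).take (i + 1 - i) = [a[i]'hj] := by
        rw [show i + 1 - i = 1 by omega, List.take_one, List.head?_drop,
          List.getElem?_eq_getElem hj, Option.toList_some]
      have htp : pvTp ((a.drop i).take (i + 1 - i)) = [a[i]'hj] := by
        rw [hseg, pvTp, dif_pos (by simp)]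
      rw [htp]
      conv_lhs => rw [← List.take_append_drop i a, List.drop_eq_getElem_cons hj]
      simp
    · have hij2 : i = j + 1 := by omega
      subst hij2
      rw [show j + 1 - (j + 1) = 0 by omega, List.take_zero]
      have htp : pvTp ([] : List Char) = [] := by rw [pvTp]; simp
      rw [htp]
      simp

theorem reverseVowel_alt_eq_fill (s : String) :
    reverseVowel_alt s = String.ofList (pvFill s.toList ((s.toList.filter pvIsVowel).reverse)) := by
  simp only [reverseVowel_alt]
  rcases h : s.toList with _ | ⟨c, t⟩
  · rw [twoPtrGo, dif_neg (by simp)]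
    simp [pvFill]
  · have hlen : 0 < s.toList.length := by rw [h]; simp
    rw [← h]
    rw [twoPtrGo_eq_tp s.toList 0 (s.toList.length - 1) (by omega) (by omega)]
    rw [show s.toList.length - 1 + 1 - 0 = s.toList.length by omega]
    rw [List.take_zero, List.drop_zero, List.take_length]
    rw [show s.toList.length - 1 + 1 = s.toList.length by omega, List.drop_length]
    rw [pvTp_eq_fill s.toList.length s.toList rfl]
    simp

-- ---- length bookkeeping for the tightness claim ----
theorem loop2_len (W : List Char) :
    ∀ (cs : List Char) (acc : List Char) (m : Int),
      (((cs.foldl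
        (fun (st : List Char × Int) t =>
          if t == '*' then
            let m := st.2 - 1
            (if 0 ≤ m then st.1 ++ [PySem.List.pyGetD W m ' '] else st.1, m)
          else
            (st.1 ++ [t], st.2))
        (acc, m)).1.length : Int))
      = acc.length + cs.length - cs.count '*' + min (cs.count '*' : Int) (max m 0) := by
  intro cs
  induction cs with
  | nil => intro acc m; simp
  | cons c cs ih =>
    intro acc m
    rw [List.foldl_cons]
    by_cases hc : c = '*'
    · subst hc
      simp only [BEq.rfl, if_pos]
      by_cases hm : 0 ≤ m - 1
      · rw [if_pos hm, ih]
        simp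
        omega
      · rw [if_neg hm, ih]
        simp
        omega
    · rw [if_neg (by simp [hc])]
      rw [ih]
      simp [hc]
      omega

theorem countP_star_or (l : List Char) :
    l.countP (fun c => pvVowels.contains c || c == '*')
      = l.countP pvVowels.contains + l.count '*' := by
  induction l with
  | nil => simp
  | cons c cs ih =>
    rw [List.countP_cons, List.countP_cons, List.count_cons, ih]
    have hs : pvVowels.contains '*' = false := by decide
    by_cases hc : c = '*'
    · subst hc
      rw [hs]
      simp
      omega
    · have hcb : (c == '*') = false := by simp [hc]
      rw [hcb]
      by_cases hv : pvVowels.contains c = true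
      · rw [hv]
        simp
        omega
      · rw [show pvVowels.contains c = false by simpa using hv]
        simp

theorem count_star_map (l : List Char) :
    (l.map (fun c => if pvVowels.contains c then '*' else c)).count '*'
      = l.countP (fun c => pvVowels.contains c || c == '*') := by
  rw [List.count, List.countP_map]
  refine List.countP_congr fun c _ => ?_
  cases hb : pvVowels.contains c
  · have hm : c ∉ pvVowels := by simpa using hb
    simp
    exact Or.inl hm
  · have hm : c ∈ pvVowels := by simpa using hb
    simp
    exact fun h => absurd hm h

theorem reverseVowel_length (s : String) :
    ((reverseVowel s).toList.length : Int) = s.toList.length - s.toList.count '*' := by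
  simp only [reverseVowel]
  have h1 := loop1_inv s.toList s.toList []
  rw [pvMark_nil] at h1
  simp only [List.filter_nil, List.length_nil, Nat.cast_zero, List.nil_append] at h1
  rw [h1, pvMark_self]
  rw [String.toList_ofList, loop2_len]
  rw [count_star_map, countP_star_or]
  have hK : s.toList.countP pvVowels.contains ≤ s.toList.length := List.countP_le_length
  have hW : ((s.toList.filter pvVowels.contains).length : Int)
      = (s.toList.countP pvVowels.contains : Int) := by rw [List.countP_eq_length_filter]
  rw [List.length_map, hW]
  rw [max_eq_left (Int.natCast_nonneg _)]
  push_cast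
  rw [min_eq_right (le_add_of_nonneg_right (Int.natCast_nonneg _))]
  simp only [List.length_nil, Nat.cast_zero]
  omega

theorem twoPtrGo_length : ∀ (a : List Char) (i j : Nat),
    (twoPtrGo a i j).length = a.length := by
  intro a i j
  induction a, i, j using twoPtrGo.induct with
  | case1 a i j h hv ih => rw [twoPtrGo, dif_pos h, if_pos hv]; exact ih
  | case2 a i j h hv1 hv2 ih => rw [twoPtrGo, dif_pos h, if_neg hv1, if_pos hv2]; exact ih
  | case3 a i j h hv1 hv2 ih =>
      rw [twoPtrGo, dif_pos h, if_neg hv1, if_neg hv2]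
      rw [ih]; simp
  | case4 a i j h => rw [twoPtrGo, dif_neg h]

theorem reverseVowel_alt_length (s : String) :
    (reverseVowel_alt s).toList.length = s.toList.length := by
  simp only [reverseVowel_alt]
  rw [String.toList_ofList, twoPtrGo_length]

-- ===== VERDICT (by name: the statement is the Claim_ definition above) =====
theorem reverseVowel_spec : Claim_unchanged_reverseVowel := by
  intro s _
  unfold Spec_reverseVowel
  intro hD
  unfold D_reverseVowel at hD
  rw [reverseVowel_eq_fill s hD, reverseVowel_alt_eq_fill]

theorem reverseVowel_changed : Claim_changed_reverseVowel := by
  unfold Claim_changed_reverseVowel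
  refine ⟨by decide, by decide, by decide, ?_, by decide⟩
  rw [show reverseVowel_alt pvDiffWitness_reverseVowel
        = String.ofList (pvFill pvDiffWitness_reverseVowel.toList
            ((pvDiffWitness_reverseVowel.toList.filter pvIsVowel).reverse)) from
      reverseVowel_alt_eq_fill _]
  decide

theorem reverseVowel_tight : Claim_exact_reverseVowel := by
  intro s _ hD heq
  unfold D_reverseVowel at hD
  have hc : 0 < s.toList.count '*' := List.count_pos_iff.mpr hD
  have hA := reverseVowel_length s
  have hB := reverseVowel_alt_length s
  rw [heq, hB] at hA
  omega
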